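-- pv_equiv track=rewrite | github.com/YunZhi246/MahjongFun | determine_winning_hand.py | find_leftovers
-- ===== SOURCE A (Python) =====
-- import copy
--
-- def find_leftovers(combos, nums_list):
--     possibilities = []
--     for c in combos:
--         left = copy.deepcopy(nums_list)
--         for n in c:
--             left.remove(n)
--         possibilities.append((c, left))
--     return possibilities
-- ===== SOURCE B (Python) =====
-- def find_leftovers(combos, nums_list):
--     result = []
--     for c in combos:
--         need = {}
--         for n in c:
--             need[n] = need.get(n, 0) + 1
--         left = []
--         for x in nums_list:
--             k = need.get(x, 0)
--             if k > 0:
--                 need[x] = k - 1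
--             else:
--                 left.append(x)
--         if any(need.values()):
--             raise ValueError("combo %r is not contained in nums_list" % (c,))
--         result.append((c, left))
--     return result
-- ===== Notes on version B (the rewrite author's own statement) =====
-- stated objective: faster
-- what changed: Instead of deep-copying nums_list and calling list.remove once per combo element (each a linear scan), B builds a count dict of the combo and does a single ordered pass over nums_list skipping still-needed counts, raising ValueError like A when a combo is not contained.
import Mathlib
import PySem

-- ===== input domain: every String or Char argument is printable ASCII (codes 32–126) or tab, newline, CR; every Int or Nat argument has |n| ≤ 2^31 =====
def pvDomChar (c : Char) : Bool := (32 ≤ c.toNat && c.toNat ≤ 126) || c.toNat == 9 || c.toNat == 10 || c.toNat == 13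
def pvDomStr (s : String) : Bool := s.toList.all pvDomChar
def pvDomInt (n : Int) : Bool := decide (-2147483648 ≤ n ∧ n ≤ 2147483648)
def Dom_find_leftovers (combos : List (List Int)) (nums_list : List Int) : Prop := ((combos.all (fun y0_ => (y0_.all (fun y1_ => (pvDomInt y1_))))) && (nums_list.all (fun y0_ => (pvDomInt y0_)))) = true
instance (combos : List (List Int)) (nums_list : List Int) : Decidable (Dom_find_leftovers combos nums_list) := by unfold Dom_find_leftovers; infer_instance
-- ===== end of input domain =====

-- B replaces A's deepcopy + per-element list.remove with a count-dict of the combo and one ordered pass over nums_list (faster).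


-- ===== PORT A =====
def find_leftovers (combos : List (List Int)) (nums_list : List Int) : List (List Int × List Int) :=
  combos.foldl (fun possibilities c =>
    possibilities ++ [(c, c.foldl (fun left n => (PySem.List.remove? left n).getD left) nums_list)]) []
  -- '(… remove? …).getD left' is reachable only outside Pre_, where Python's list.remove raises ValueError

-- ===== PORT B =====
def find_leftovers_alt (combos : List (List Int)) (nums_list : List Int) : List (List Int × List Int) :=
  combos.foldl (fun result c =>
    let need := c.foldl (fun d n => d.insert n (d.getD n 0 + 1)) (PySem.Dict.empty : PySem.Dict Int Int)
    let fin := nums_list.foldl (fun (st : PySem.Dict Int Int × List Int) x =>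
        let k := st.1.getD x 0
        if 0 < k then (st.1.insert x (k - 1), st.2) else (st.1, st.2 ++ [x]))
      (need, ([] : List Int))
    if fin.1.values.any (fun v => !(v == 0)) then
      result ++ [(c, fin.2)]  -- Python B raises ValueError here ('if any(need.values())'); unreachable inside Pre_, so the returned value is irrelevant
    else
      result ++ [(c, fin.2)]) []

-- ===== PRECONDITION & SPEC =====
-- Pre_ excludes inputs where some combo is not a sub-multiset of nums_list: there Python A raises ValueError (list.remove)
def Pre_find_leftovers (combos : List (List Int)) (nums_list : List Int) : Prop :=
  ∀ c ∈ combos, ∀ n ∈ c, List.count n c ≤ List.count n nums_list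
instance (combos : List (List Int)) (nums_list : List Int) : Decidable (Pre_find_leftovers combos nums_list) := by unfold Pre_find_leftovers; infer_instance
def pvWitness_find_leftovers : List (List Int) × List Int := ([[1, 2], [2, 2]], [1, 2, 2, 3])


def Spec_find_leftovers (combos : List (List Int)) (nums_list : List Int) (out : List (List Int × List Int)) : Prop := out = find_leftovers_alt combos nums_list
instance (combos : List (List Int)) (nums_list : List Int) (out : List (List Int × List Int)) : Decidable (Spec_find_leftovers combos nums_list out) := by unfold Spec_find_leftovers; infer_instance

-- ===== CLAIM (what is proved, stated in full; the proofs are below) =====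
def Claim_equal_find_leftovers : Prop := ∀ (combos : List (List Int)) (nums_list : List Int), Dom_find_leftovers combos nums_list → Pre_find_leftovers combos nums_list → Spec_find_leftovers combos nums_list (find_leftovers combos nums_list)

-- ===== LEMMAS AND PROOFS =====

-- abstract counted-skip pass, with the counter as a plain function
def pvF (k : Int → Int) : List Int → List Int
  | [] => []
  | x :: xs => if 0 < k x then pvF (fun y => if y = x then k x - 1 else k y) xs else x :: pvF k xs

-- fallback remove (A's step)
def pvRm (left : List Int) (n : Int) : List Int := (PySem.List.remove? left n).getD left

lemma pvRm_cons_of_ne {x n : Int} (h : x ≠ n) (xs : List Int) : pvRm (x :: xs) n = x :: pvRm xs n := by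
  simp only [pvRm, PySem.List.remove?_cons_of_ne xs h]
  cases PySem.List.remove? xs n <;> simp

lemma pvF_eq_of_funeq {k k' : Int → Int} (h : ∀ y, k y = k' y) (l : List Int) : pvF k l = pvF k' l := by
  have : k = k' := funext h
  rw [this]

lemma pvF_of_nonpos {k : Int → Int} (h : ∀ y, k y ≤ 0) (l : List Int) : pvF k l = l := by
  induction l with
  | nil => rfl
  | cons x xs ih =>
    rw [pvF, if_neg (show ¬ (0:Int) < k x by have hx := h x; omega), ih]

-- one removal: bumping the counter at n is the same as first removing the first n
lemma pvF_bump (n : Int) (k k' : Int → Int) (left : List Int)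
    (hk' : ∀ y, k' y = if y = n then k n + 1 else k y) (hk : 0 ≤ k n) :
    pvF k' left = pvF k (pvRm left n) := by
  induction left generalizing k k' with
  | nil => simp [pvF, pvRm, PySem.List.remove?]
  | cons x xs ih =>
    by_cases hx : x = n
    · subst hx
      rw [show pvRm (x :: xs) x = xs by simp [pvRm]]
      have hx' : k' x = k x + 1 := by rw [hk']; simp
      simp only [pvF, hx', if_pos (by omega : (0:Int) < k x + 1)]
      exact pvF_eq_of_funeq (by
        intro y; by_cases hy : y = x
        · simp [hy]
        · simp [hy, hk' y]) xs
    · rw [pvRm_cons_of_ne hx]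
      have hxx : k' x = k x := by rw [hk']; simp [hx]
      simp only [pvF, hxx]
      by_cases hpos : 0 < k x
      · rw [if_pos hpos, if_pos hpos]
        exact ih (fun y => if y = x then k x - 1 else k y) (fun y => if y = x then k x - 1 else k' y)
          (by intro y
              by_cases h1 : y = x
              · simp [h1, hx]
              · simp only [if_neg h1, hk' y]
                by_cases h2 : y = n <;> simp [h2, Ne.symm hx]) (by simp [Ne.symm hx]; omega)
      · rw [if_neg hpos, if_neg hpos, ih k k' hk' hk]

-- A's inner loop equals the abstract pass with the combo's counts
lemma pvA_eq_pvF (c : List Int) (left : List Int) :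
    c.foldl (fun l n => (PySem.List.remove? l n).getD l) left = pvF (fun v => (c.count v : Int)) left := by
  induction c generalizing left with
  | nil =>
    simp only [List.foldl_nil]
    exact (pvF_of_nonpos (by simp) left).symm
  | cons n c' ih =>
    simp only [List.foldl_cons]
    rw [ih]
    rw [show ((PySem.List.remove? left n).getD left) = pvRm left n from rfl]
    refine (pvF_bump n (fun v => (c'.count v : Int)) _ left ?_ (Int.natCast_nonneg _)).symm
    intro y
    by_cases hy : y = n
    · simp [hy]
    · simp [hy, List.count_cons, Ne.symm hy]

-- the built dict counts the combo
lemma pvNeed_getD (c : List Int) (d : PySem.Dict Int Int) (v : Int) :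
    (c.foldl (fun d n => d.insert n (d.getD n 0 + 1)) d).getD v 0 = d.getD v 0 + (c.count v : Int) := by
  induction c generalizing d with
  | nil => simp
  | cons n c' ih =>
    simp only [List.foldl_cons, ih, PySem.Dict.getD_insert, List.count_cons]
    by_cases hv : v = n <;> simp [hv] <;> omega

-- B's scan loop equals the abstract pass
lemma pvB_scan (nums : List Int) (d : PySem.Dict Int Int) (acc : List Int) :
    (nums.foldl (fun (st : PySem.Dict Int Int × List Int) x =>
        let k := st.1.getD x 0
        if 0 < k then (st.1.insert x (k - 1), st.2) else (st.1, st.2 ++ [x])) (d, acc)).2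
      = acc ++ pvF (fun v => d.getD v 0) nums := by
  induction nums generalizing d acc with
  | nil => simp [pvF]
  | cons x xs ih =>
    simp only [List.foldl_cons, pvF]
    by_cases hpos : 0 < d.getD x 0
    · simp only [if_pos hpos]
      rw [ih (d.insert x (d.getD x 0 - 1)) acc,
        pvF_eq_of_funeq (fun y => PySem.Dict.getD_insert d x y (d.getD x 0 - 1) 0) xs]
    · simp only [if_neg hpos]
      rw [ih d (acc ++ [x])]
      simp

-- the two programs agree on every input of the Lean ports (A's fallback remove matches B's skip)
lemma pv_ports_eq (combos : List (List Int)) (nums_list : List Int) :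
    find_leftovers combos nums_list = find_leftovers_alt combos nums_list := by
  unfold find_leftovers find_leftovers_alt
  simp only [ite_self]
  rw [PySem.List.foldl_append_singleton_eq_map, PySem.List.foldl_append_singleton_eq_map]
  simp only [List.nil_append]
  apply List.map_congr_left
  intro c _
  refine congrArg (fun l => (c, l)) ?_
  rw [pvA_eq_pvF, pvB_scan]
  simp only [List.nil_append]
  exact pvF_eq_of_funeq (by intro v; rw [pvNeed_getD]; simp) nums_list

-- ===== VERDICT (by name: the statement is the Claim_ definition above) =====
theorem find_leftovers_spec : Claim_equal_find_leftovers := by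
  intro combos nums_list _ _
  unfold Spec_find_leftovers
  exact pv_ports_eq combos nums_list
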